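-- pv_equiv track=rewrite | github.com/stan12138/Create_OS | tools/fat.py | fat2number
-- ===== SOURCE A (Python) =====
-- def fat2number(fat_content) :
-- 	"""
-- 	将原始的二进制形式的fat解析为序号列表
-- 	"""
-- 	fat_list = [one for one in fat_content]
-- 	sector_list = []
-- 	num = len(fat_list)
-- 	for i in range(int(num/3)) :
-- 		a,b,c = fat_list[3*i:3*(i+1)]
--
-- 		b1 = b>>4
-- 		b2 = b&0x0f
--
-- 		sector_list.append((b2<<8)+a)
-- 		sector_list.append((c<<4)+b1)
-- 	return sector_list
-- ===== SOURCE B (Python) =====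
-- def fat2number(fat_content):
--     data = [one for one in fat_content]
--     t = len(data) // 3
--     out = []
--     for i in range(2 * t):
--         off = i + i // 2
--         if i % 2 == 0:
--             out.append(((data[off + 1] & 0x0f) << 8) + data[off])
--         else:
--             out.append((data[off + 1] << 4) + (data[off] >> 4))
--     return out
-- ===== Notes on version B (the rewrite author's own statement) =====
-- stated objective: alternative
-- what changed: B iterates once per 12-bit entry with a parity branch and byte offset i + i//2, instead of A's per-triple loop that slices three bytes and appends two entries at a time.
import Mathlib
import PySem

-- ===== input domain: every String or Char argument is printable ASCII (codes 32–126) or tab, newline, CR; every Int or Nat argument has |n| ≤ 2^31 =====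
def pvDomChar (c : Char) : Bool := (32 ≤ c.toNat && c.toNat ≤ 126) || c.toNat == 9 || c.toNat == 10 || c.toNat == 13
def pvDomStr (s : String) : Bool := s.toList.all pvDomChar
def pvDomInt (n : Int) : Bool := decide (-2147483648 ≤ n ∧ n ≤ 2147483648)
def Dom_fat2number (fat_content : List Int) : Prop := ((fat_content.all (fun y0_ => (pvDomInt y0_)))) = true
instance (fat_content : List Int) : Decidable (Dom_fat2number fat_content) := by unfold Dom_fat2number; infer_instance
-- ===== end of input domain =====

-- B traverses the FAT entry-by-entry with a parity branch (byte offset i + i//2) instead of A's triple-by-triple loop with two appends; same values, alternative decomposition.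


-- ===== PORT A =====
-- Transliteration of A: loop over triples, slice out (a,b,c), append two entries.
def fat2number (fat_content : List Int) : List Int :=
  let fat_list := fat_content
  let num := fat_list.length
  (List.range (num / 3)).foldl (fun sector_list (i : Nat) =>
    match PySem.List.slice fat_list (some (3 * (i : Int))) (some (3 * ((i : Int) + 1))) with
    | [a, b, c] =>
      let b1 := b >>> 4
      let b2 := PySem.Int.band b 0x0f
      (sector_list ++ [(b2 <<< 8) + a]) ++ [(c <<< 4) + b1]
    | _ => sector_list) []

-- ===== PORT B =====
-- Transliteration of B: one entry per iteration, parity branch, byte offset i + i/2.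
def fat2number_alt (fat_content : List Int) : List Int :=
  let data := fat_content
  let t := data.length / 3
  (List.range (2 * t)).foldl (fun out i =>
    let off := i + i / 2
    if i % 2 == 0 then
      out ++ [((PySem.Int.band (data.getD (off + 1) 0) 0x0f) <<< 8) + data.getD off 0]
    else
      out ++ [((data.getD (off + 1) 0) <<< 4) + ((data.getD off 0) >>> 4)]) []

-- ===== PRECONDITION & SPEC =====
def Spec_fat2number (fat_content : List Int) (out : List Int) : Prop := out = fat2number_alt fat_content
instance (fat_content : List Int) (out : List Int) : Decidable (Spec_fat2number fat_content out) := by unfold Spec_fat2number; infer_instance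

-- ===== CLAIM (what is proved, stated in full; the proofs are below) =====
def Claim_equal_fat2number : Prop := ∀ (fat_content : List Int), Dom_fat2number fat_content → Spec_fat2number fat_content (fat2number fat_content)

-- ===== LEMMAS AND PROOFS =====

-- ===== VERDICT (by name: the statement is the Claim_ definition above) =====
-- entry value at index i (B's view)
def pvEntry (l : List Int) (i : Nat) : Int :=
  if i % 2 == 0 then ((PySem.Int.band (l.getD (i + i / 2 + 1) 0) 0x0f) <<< 8) + l.getD (i + i / 2) 0
  else ((l.getD (i + i / 2 + 1) 0) <<< 4) + ((l.getD (i + i / 2) 0) >>> 4)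

theorem altFoldl (l : List Int) (n : Nat) (acc : List Int) :
    (List.range n).foldl (fun out i =>
      let off := i + i / 2
      if i % 2 == 0 then
        out ++ [((PySem.Int.band (l.getD (off + 1) 0) 0x0f) <<< 8) + l.getD off 0]
      else
        out ++ [((l.getD (off + 1) 0) <<< 4) + ((l.getD off 0) >>> 4)]) acc
    = acc ++ (List.range n).map (pvEntry l) := by
  induction n generalizing acc with
  | zero => simp
  | succ n ih =>
    rw [List.range_succ, List.foldl_append, ih]
    simp only [List.foldl_cons, List.foldl_nil]
    split <;> simp_all [pvEntry]

theorem slice_triple (l : List Int) (i : Nat) (h : 3 * i + 3 ≤ l.length) :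
    PySem.List.slice l (some (3 * (i : Int))) (some (3 * ((i : Int) + 1)))
      = [l.getD (3 * i) 0, l.getD (3 * i + 1) 0, l.getD (3 * i + 2) 0] := by
  have : (3 : Int) * ((i : Int) + 1) = ((3 * i : Nat) : Int) + ((3 : Nat) : Int) := by push_cast; ring
  rw [show ((3 : Int) * (i : Int)) = ((3 * i : Nat) : Int) by push_cast; ring, this,
    PySem.List.slice_natCast_add]
  have h1 : 3 * i < l.length := by omega
  have h2 : 3 * i + 1 < l.length := by omega
  have h3 : 3 * i + 2 < l.length := by omega
  apply List.ext_getElem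
  · simp [List.length_take, List.length_drop]; omega
  · intro k hk hk'
    simp only [List.getElem_take, List.getElem_drop]
    have hk3 : k < 3 := by simp [List.length_take, List.length_drop] at hk; omega
    interval_cases k <;> simp [h1, h2, h3]

theorem aFoldl (l : List Int) (n : Nat) (acc : List Int) (h : 3 * n ≤ l.length) :
    (List.range n).foldl (fun sector_list (i : Nat) =>
      match PySem.List.slice l (some (3 * (i : Int))) (some (3 * ((i : Int) + 1))) with
      | [a, b, c] =>
        (sector_list ++ [((PySem.Int.band b 0x0f) <<< 8) + a]) ++ [(c <<< 4) + (b >>> 4)]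
      | _ => sector_list) acc
    = acc ++ (List.range (2 * n)).map (pvEntry l) := by
  induction n generalizing acc with
  | zero => simp
  | succ n ih =>
    have hn : 3 * n + 3 ≤ l.length := by omega
    rw [List.range_succ, List.foldl_append, ih acc (by omega)]
    simp only [List.foldl_cons, List.foldl_nil, slice_triple l n hn]
    have : 2 * (n + 1) = (2 * n + 1) + 1 := by ring
    rw [this, List.range_succ, List.range_succ]
    have e1 : pvEntry l (2 * n) = ((PySem.Int.band (l.getD (3 * n + 1) 0) 0x0f) <<< 8) + l.getD (3 * n) 0 := by
      unfold pvEntry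
      rw [if_pos (by simp [Nat.mul_mod_right]), show 2 * n + (2 * n) / 2 = 3 * n from by omega]
    have e2 : pvEntry l (2 * n + 1) = ((l.getD (3 * n + 2) 0) <<< 4) + ((l.getD (3 * n + 1) 0) >>> 4) := by
      unfold pvEntry
      have hm : (2 * n + 1) % 2 = 1 := by omega
      rw [if_neg (by simp [hm]), show 2 * n + 1 + (2 * n + 1) / 2 = 3 * n + 1 from by omega]
    simp [e1, e2]

-- ===== VERDICT =====
theorem fat2number_spec : Claim_equal_fat2number := by
  intro l _
  unfold Spec_fat2number fat2number fat2number_alt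
  rw [altFoldl, aFoldl l (l.length / 3) [] (by omega)]
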